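-- pv_equiv track=rewrite | github.com/XinnuoXu/Highlight_based_Summarization | Document_highlight.GloVE/script/context_selection_fact.py | doc_fact
-- ===== SOURCE A (Python) =====
-- def label_classify(item):
--     if item[0] == '(':
--         if item[1] == 'F':
--             return "fact"
--         else:
--             return "phrase"
--     elif item[0] == ')':
--         return "end"
--     elif item[0] == '*':
--         return "reference"
--     return "token"
--
-- def doc_fact(line):
--     fact_stack = []
--     type_stack = []
--     fact_id_map = {}
--     fact_terms = {}
--     fact_id = 0
--     for i, item in enumerate(line):
--         l_type = label_classify(item)
--         if l_type in ["fact"]: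
--             fact_stack.append(fact_id)
--             fact_id_map[fact_id] = fact_stack[0]
--             type_stack.append(l_type)
--             fact_id += 1
--         elif l_type in ["phrase"]:
--             type_stack.append(l_type)
--         elif l_type in ["end"]:
--             pop_type = type_stack.pop()
--             if pop_type == "fact":
--                 fact_stack.pop()
--         elif l_type not in ["reference"]:
--             for j in fact_stack:
--                 if j not in fact_terms:
--                     fact_terms[j] = []
--                 fact_terms[j].append(item)
--     return fact_terms, fact_id_map
-- ===== SOURCE B (Python) =====
-- def doc_fact(line):
--     # Collect-at-close: one stack of frames (None = phrase, [fid, buf, registered] = fact).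
--     # A token goes only to the innermost open fact's buffer; when a fact closes, its buffer
--     # is merged into the enclosing fact's buffer, so no per-token walk over all open facts.
--     frames = []
--     order = []            # fact ids in the order their first token arrives (outer before inner)
--     done = {}             # fid -> finished token list (only for facts that saw a token)
--     fact_id_map = {}
--     fact_id = 0
--
--     def close_top():
--         fr = frames.pop()
--         if fr is not None:
--             fid, buf, reg = fr
--             if reg:
--                 done[fid] = buf
--             for up in reversed(frames):
--                 if up is not None:
--                     up[1].extend(buf)
--                     break
--
--     for item in line:
--         if item[0] == '(':
--             if item[1] == 'F':
--                 root = fact_id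
--                 for fr in frames:
--                     if fr is not None:
--                         root = fr[0]
--                         break
--                 fact_id_map[fact_id] = root
--                 frames.append([fact_id, [], False])
--                 fact_id += 1
--             else:
--                 frames.append(None)
--         elif item[0] == ')':
--             close_top()
--         elif item[0] != '*':
--             newly = []
--             for fr in reversed(frames):
--                 if fr is not None:
--                     if fr[2]:
--                         break
--                     fr[2] = True
--                     newly.append(fr[0])
--             order.extend(reversed(newly))
--             for fr in reversed(frames):
--                 if fr is not None:
--                     fr[1].append(item)
--                     break
--     while frames:
--         close_top()
--     fact_terms = {fid: done[fid] for fid in order}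
--     return fact_terms, fact_id_map
-- ===== Notes on version B (the rewrite author's own statement) =====
-- stated objective: alternative
-- what changed: Replaces A's per-token inner loop over every open fact (dict inserts per ancestor) by a single stack of per-fact buffers: a token is appended once to the innermost fact's buffer, buffers are merged into the enclosing fact when a bracket closes, and fact_terms is assembled at the end from a first-token-order key list.
import Mathlib
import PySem

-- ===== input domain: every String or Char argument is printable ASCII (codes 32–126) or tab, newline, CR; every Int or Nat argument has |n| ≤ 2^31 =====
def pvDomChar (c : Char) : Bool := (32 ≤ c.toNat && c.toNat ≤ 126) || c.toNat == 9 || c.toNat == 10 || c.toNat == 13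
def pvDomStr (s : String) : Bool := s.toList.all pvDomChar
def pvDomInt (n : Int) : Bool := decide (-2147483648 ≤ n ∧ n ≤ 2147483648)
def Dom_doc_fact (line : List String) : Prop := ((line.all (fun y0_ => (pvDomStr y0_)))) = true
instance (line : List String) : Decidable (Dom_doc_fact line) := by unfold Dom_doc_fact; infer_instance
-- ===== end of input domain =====

-- B replaces A's per-token walk over all open facts by a single stack of buffers merged at
-- bracket close (objective: alternative decomposition; return value only — no mutation).

-- ===== PORT A =====
def label_classify (item : String) : String :=
  if PySem.Str.pyGet? item 0 = some '(' then
    if PySem.Str.pyGet? item 1 = some 'F' then "fact" else "phrase"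
  else if PySem.Str.pyGet? item 0 = some ')' then "end"
  else if PySem.Str.pyGet? item 0 = some '*' then "reference"
  else "token"

structure StA where
  fact_stack : List Int
  type_stack : List String
  fact_id_map : PySem.Dict Int Int
  fact_terms : PySem.Dict Int (List String)
  fact_id : Int

def stepA (s : StA) (item : String) : StA :=
  let lt := label_classify item
  if lt = "fact" then
    let fs := s.fact_stack ++ [s.fact_id]
    { s with fact_stack := fs,
             fact_id_map := s.fact_id_map.insert s.fact_id ((PySem.List.pyGet? fs 0).getD 0),
             type_stack := s.type_stack ++ ["fact"],
             fact_id := s.fact_id + 1 }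
  else if lt = "phrase" then { s with type_stack := s.type_stack ++ ["phrase"] }
  else if lt = "end" then
    -- Python type_stack.pop(): IndexError on empty stack is excluded by Pre_
    (match s.type_stack.getLast? with
    | none => s
    | some pop_type =>
      if pop_type = "fact" then
        { s with type_stack := s.type_stack.dropLast, fact_stack := s.fact_stack.dropLast }
      else { s with type_stack := s.type_stack.dropLast })
  else if ¬ (lt = "reference") then
    { s with fact_terms := (s.fact_stack.foldl
        (fun d j => (if d.contains j then d else d.insert j []).modify j [] (fun l => l ++ [item]))
        s.fact_terms) }
  else s

def doc_fact (line : List String) : (List (Int × List String)) × (List (Int × Int)) :=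
  let s := line.foldl stepA ⟨[], [], PySem.Dict.empty, PySem.Dict.empty, 0⟩
  (s.fact_terms.items, s.fact_id_map.items)

-- ===== PORT B =====
-- stacks are Lean lists with head = top of the Python list
abbrev BFrame := Option (Int × List String × Bool)

def mergeUp : List BFrame → List String → List BFrame
  | [], _ => []
  | none :: rest, buf => none :: mergeUp rest buf
  | some (f, b, r) :: rest, buf => some (f, b ++ buf, r) :: rest

def rootScan : List BFrame → Option Int
  | [] => none
  | none :: rest => rootScan rest
  | some (f, _, _) :: _ => some f

def collectNewly : List BFrame → List Int × List BFrame
  | [] => ([], [])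
  | none :: rest =>
      let (n, r) := collectNewly rest; (n, none :: r)
  | some (f, b, reg) :: rest =>
      if reg then ([], some (f, b, reg) :: rest)
      else let (n, r) := collectNewly rest; (f :: n, some (f, b, true) :: r)

structure StB where
  frames : List BFrame
  order : List Int
  done : PySem.Dict Int (List String)
  fact_id_map : PySem.Dict Int Int
  fact_id : Int

def closeTop (s : StB) : StB :=
  match s.frames with
  | [] => s      -- Python frames.pop(): IndexError, excluded by Pre_
  | none :: rest => { s with frames := rest }
  | some (fid, buf, reg) :: rest =>
      { s with frames := mergeUp rest buf,
               done := if reg then s.done.insert fid buf else s.done }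

def stepB (s : StB) (item : String) : StB :=
  if PySem.Str.pyGet? item 0 = some '(' then
    if PySem.Str.pyGet? item 1 = some 'F' then
      { s with frames := some (s.fact_id, [], false) :: s.frames,
               fact_id_map := s.fact_id_map.insert s.fact_id
                 ((rootScan s.frames.reverse).getD s.fact_id),
               fact_id := s.fact_id + 1 }
    else { s with frames := none :: s.frames }
  else if PySem.Str.pyGet? item 0 = some ')' then closeTop s
  else if PySem.Str.pyGet? item 0 = some '*' then s
  else
    let (newly, fr) := collectNewly s.frames
    { s with order := s.order ++ newly.reverse, frames := mergeUp fr [item] }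

theorem mergeUp_length (l : List BFrame) (b : List String) : (mergeUp l b).length = l.length := by
  induction l with
  | nil => rfl
  | cons fr rest ih =>
    cases fr with
    | none => simp [mergeUp, ih]
    | some p => obtain ⟨f, bb, r⟩ := p; simp [mergeUp]

-- 'while frames: close_top()' (only frames and done change there)
def flushFrames : List BFrame → PySem.Dict Int (List String) → PySem.Dict Int (List String)
  | [], done => done
  | none :: rest, done => flushFrames rest done
  | some (fid, buf, reg) :: rest, done =>
      flushFrames (mergeUp rest buf) (if reg then done.insert fid buf else done)
termination_by l _ => l.length
decreasing_by all_goals simp [mergeUp_length]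

def doc_fact_alt (line : List String) : (List (Int × List String)) × (List (Int × Int)) :=
  let s := line.foldl stepB ⟨[], [], PySem.Dict.empty, PySem.Dict.empty, 0⟩
  let done := flushFrames s.frames s.done
  let fact_terms := s.order.foldl (fun d f => d.insert f (done.getD f [])) PySem.Dict.empty
  (fact_terms.items, s.fact_id_map.items)

-- ===== PRECONDITION & SPEC =====
-- Pre_ excludes exactly the inputs where Python A raises IndexError: an empty item
-- (item[0]), an item "(" of length 1 (item[1]), or a prefix with more ')'-items than
-- '('-items (type_stack.pop() on an empty stack).
def Pre_doc_fact (line : List String) : Prop :=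
  (∀ s ∈ line, s ≠ "") ∧
  (∀ s ∈ line, PySem.Str.pyGet? s 0 = some '(' → (PySem.Str.pyGet? s 1).isSome) ∧
  (∀ n ∈ List.range (line.length + 1),
    (line.take n).countP (fun s => PySem.Str.pyGet? s 0 == some ')') ≤
    (line.take n).countP (fun s => PySem.Str.pyGet? s 0 == some '('))

instance (line : List String) : Decidable (Pre_doc_fact line) := by
  unfold Pre_doc_fact; infer_instance

def pvWitness_doc_fact : List String := ["(F", "(S", "the", "dog", ")", "*1", "barks", ")"]

def Spec_doc_fact (line : List String) (out : (List (Int × List String)) × (List (Int × Int))) : Prop := out = doc_fact_alt line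
instance (line : List String) (out : (List (Int × List String)) × (List (Int × Int))) : Decidable (Spec_doc_fact line out) := by unfold Spec_doc_fact; infer_instance

-- ===== CLAIM (what is proved, stated in full; the proofs are below) =====
def Claim_equal_doc_fact : Prop := ∀ (line : List String), Dom_doc_fact line → Pre_doc_fact line → Spec_doc_fact line (doc_fact line)

-- ===== LEMMAS AND PROOFS =====

def bFacts (l : List BFrame) : List (Int × List String × Bool) := l.filterMap id

def frameType : BFrame → String
  | none => "phrase"
  | some _ => "fact"

-- open facts with their cumulative token lists (own buffer ++ buffers of enclosed
-- still-open facts), scanning from the top of the stack with accumulated inner buffers p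
def openEnts : List BFrame → List String → List (Int × List String × Bool)
  | [], _ => []
  | none :: r, p => openEnts r p
  | some (f, b, rg) :: r, p => (f, b ++ p, rg) :: openEnts r (b ++ p)

def allReg (l : List BFrame) : Bool :=
  l.all fun fr => match fr with | none => true | some (_, _, rg) => rg

def segOK : List BFrame → Bool
  | [] => true
  | none :: r => segOK r
  | some (_, b, rg) :: r => if rg then allReg r else (b.isEmpty && segOK r)

def setReg : List BFrame → List BFrame :=
  List.map (Option.map fun q => (q.1, q.2.1, true))

def valOf (sb : StB) (f : Int) : List String :=
  match (openEnts sb.frames []).lookup f with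
  | some (v, _) => v
  | none => sb.done.getD f []

def valMap (sb : StB) : List (Int × List String) := sb.order.map fun f => (f, valOf sb f)

def RInv (sa : StA) (sb : StB) : Prop :=
  sa.fact_id = sb.fact_id ∧
  sa.fact_id_map = sb.fact_id_map ∧
  sa.type_stack = (sb.frames.map frameType).reverse ∧
  sa.fact_stack = ((bFacts sb.frames).map (·.1)).reverse ∧
  sa.fact_terms = PySem.Dict.mk (valMap sb) ∧
  (∀ p ∈ bFacts sb.frames, (p.2.2 = true ↔ p.1 ∈ sb.order)) ∧
  segOK sb.frames = true ∧
  ((bFacts sb.frames).map (·.1)).Nodup ∧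
  sb.order.Nodup ∧
  sb.done.keys.Nodup ∧
  (∀ f ∈ sb.done.keys, f ∉ (bFacts sb.frames).map (·.1)) ∧
  (∀ f ∈ sb.done.keys, f ∈ sb.order) ∧
  (∀ f ∈ sb.order, f ∈ sb.done.keys ∨ f ∈ (bFacts sb.frames).map (·.1)) ∧
  (∀ f ∈ (bFacts sb.frames).map (·.1), f < sb.fact_id) ∧
  (∀ f ∈ sb.order, f < sb.fact_id)


-- ---- generic List.lookup lemmas ----
theorem lookup_map_val {α β : Type} (l : List (Int × α)) (g : α → β) (f : Int) :
    (l.map (fun p => (p.1, g p.2))).lookup f = (l.lookup f).map g := by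
  induction l with
  | nil => rfl
  | cons p r ih =>
    by_cases h : f = p.1
    · simp [List.lookup, h]
    · have hb : (f == p.1) = false := beq_eq_false_iff_ne.mpr h
      simp [List.lookup, hb, ih]

theorem lookup_mem {α : Type} (l : List (Int × α)) (f : Int) (v : α)
    (h : l.lookup f = some v) : (f, v) ∈ l := by
  induction l with
  | nil => simp [List.lookup] at h
  | cons p r ih =>
    by_cases hf : f = p.1
    · subst hf; simp [List.lookup] at h; simp [← h]
    · have hb : (f == p.1) = false := beq_eq_false_iff_ne.mpr hf
      simp [List.lookup, hb] at h
      exact List.mem_cons.mpr (Or.inr (ih h))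

theorem lookup_none {α : Type} (l : List (Int × α)) (f : Int)
    (h : f ∉ l.map (·.1)) : l.lookup f = none := by
  induction l with
  | nil => rfl
  | cons p r ih =>
    rw [List.map_cons, List.mem_cons, not_or] at h
    have hb : (f == p.1) = false := beq_eq_false_iff_ne.mpr h.1
    simp [List.lookup, hb, ih h.2]

-- ---- openEnts / mergeUp / setReg structure lemmas ----
theorem bFacts_none_cons (r : List BFrame) : bFacts (none :: r) = bFacts r := rfl
theorem bFacts_some_cons (q : Int × List String × Bool) (r : List BFrame) :
    bFacts (some q :: r) = q :: bFacts r := rfl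

theorem openEnts_pending (l : List BFrame) :
    ∀ p, openEnts l p = (openEnts l []).map (fun q => (q.1, q.2.1 ++ p, q.2.2)) := by
  induction l with
  | nil => intro p; rfl
  | cons fr r ih =>
    intro p
    cases fr with
    | none => simp [openEnts, ih p]
    | some q =>
      obtain ⟨f, b, rg⟩ := q
      simp only [openEnts]
      rw [ih (b ++ p), ih (b ++ [])]
      simp [List.map_map, Function.comp_def, List.append_assoc]

theorem openEnts_mergeUp (l : List BFrame) (b : List String) :
    ∀ p, openEnts (mergeUp l b) p = openEnts l (b ++ p) := by
  induction l with
  | nil => intro p; rfl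
  | cons fr r ih =>
    intro p
    cases fr with
    | none => simp [mergeUp, openEnts, ih p]
    | some q =>
      obtain ⟨f, c, rg⟩ := q
      simp only [mergeUp, openEnts]
      rw [openEnts_pending r ((c ++ b) ++ p), openEnts_pending r (c ++ (b ++ p))]
      simp [List.append_assoc]

theorem keys_openEnts (l : List BFrame) :
    ∀ p, (openEnts l p).map (·.1) = (bFacts l).map (·.1) := by
  induction l with
  | nil => intro p; rfl
  | cons fr r ih =>
    intro p
    cases fr with
    | none => exact ih p
    | some q =>
      obtain ⟨f, b, rg⟩ := q
      simp only [openEnts, bFacts_some_cons, List.map_cons]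
      rw [ih (b ++ p)]

theorem bFacts_mergeUp_shape (l : List BFrame) (b : List String) :
    (bFacts (mergeUp l b)).map (fun q => (q.1, q.2.2)) = (bFacts l).map (fun q => (q.1, q.2.2)) := by
  induction l with
  | nil => rfl
  | cons fr r ih =>
    cases fr with
    | none => simpa [mergeUp, bFacts_none_cons] using ih
    | some q => obtain ⟨f, c, rg⟩ := q; simp [mergeUp, bFacts_some_cons]

theorem frameType_mergeUp (l : List BFrame) (b : List String) :
    (mergeUp l b).map frameType = l.map frameType := by
  induction l with
  | nil => rfl
  | cons fr r ih =>
    cases fr with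
    | none => simp [mergeUp, ih]
    | some q => obtain ⟨f, c, rg⟩ := q; simp [mergeUp, frameType]

theorem bFacts_setReg (l : List BFrame) :
    bFacts (setReg l) = (bFacts l).map (fun q => (q.1, q.2.1, true)) := by
  induction l with
  | nil => rfl
  | cons fr r ih =>
    cases fr with
    | none => simpa [setReg, bFacts_none_cons] using ih
    | some q => obtain ⟨f, c, rg⟩ := q; simp [setReg, bFacts_some_cons] at ih ⊢; exact ih

theorem frameType_setReg (l : List BFrame) : (setReg l).map frameType = l.map frameType := by
  induction l with
  | nil => rfl
  | cons fr r ih =>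
    cases fr with
    | none => simp [setReg, frameType] at ih ⊢; exact ih
    | some q => obtain ⟨f, c, rg⟩ := q; simp [setReg, frameType] at ih ⊢; exact ih

theorem openEnts_setReg (l : List BFrame) :
    ∀ p, openEnts (setReg l) p = (openEnts l p).map (fun q => (q.1, q.2.1, true)) := by
  induction l with
  | nil => intro p; rfl
  | cons fr r ih =>
    intro p
    cases fr with
    | none => simp [setReg, openEnts] at ih ⊢; exact ih p
    | some q =>
      obtain ⟨f, c, rg⟩ := q
      simp [setReg, openEnts] at ih ⊢
      exact ih _

theorem allReg_setReg (l : List BFrame) : allReg (setReg l) = true := by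
  induction l with
  | nil => rfl
  | cons fr r ih =>
    cases fr with
    | none => simpa [setReg, allReg] using ih
    | some q => obtain ⟨f, c, rg⟩ := q; simp [setReg, allReg] at ih ⊢; exact ih

theorem allReg_cons (fr : BFrame) (r : List BFrame) (h : allReg (fr :: r) = true) :
    allReg r = true := by
  simp only [allReg, List.all_cons, Bool.and_eq_true] at h
  exact h.2

theorem allReg_mem (l : List BFrame) (h : allReg l = true) :
    ∀ q ∈ bFacts l, q.2.2 = true := by
  induction l with
  | nil => intro q hq; simp [bFacts] at hq
  | cons fr r ih =>
    cases fr with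
    | none =>
      intro q hq
      exact ih (allReg_cons _ _ h) q (by simpa [bFacts_none_cons] using hq)
    | some p =>
      obtain ⟨f, c, rg⟩ := p
      simp only [allReg, List.all_cons, Bool.and_eq_true] at h
      intro q hq
      rw [bFacts_some_cons] at hq
      rcases List.mem_cons.mp hq with h1 | h1
      · subst h1; exact h.1
      · exact ih h.2 q h1

theorem allReg_setReg_id (l : List BFrame) (h : allReg l = true) : setReg l = l := by
  induction l with
  | nil => rfl
  | cons fr r ih =>
    cases fr with
    | none =>
      have := ih (allReg_cons _ _ h)
      simp only [setReg, List.map_cons, Option.map_none] at this ⊢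
      rw [this]
    | some p =>
      obtain ⟨f, c, rg⟩ := p
      simp only [allReg, List.all_cons, Bool.and_eq_true] at h
      have hrg : rg = true := h.1
      subst hrg
      have := ih h.2
      simp only [setReg, List.map_cons, Option.map_some] at this ⊢
      rw [this]

theorem segOK_of_allReg (l : List BFrame) (h : allReg l = true) : segOK l = true := by
  induction l with
  | nil => rfl
  | cons fr r ih =>
    cases fr with
    | none => simpa [segOK] using ih (allReg_cons _ _ h)
    | some p =>
      obtain ⟨f, c, rg⟩ := p
      simp only [allReg, List.all_cons, Bool.and_eq_true] at h
      have hrg : rg = true := h.1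
      subst hrg
      simpa [segOK, allReg] using h.2

theorem collect_spec (l : List BFrame) (h : segOK l = true) :
    collectNewly l = (((bFacts l).filter (fun q => q.2.2 = false)).map (·.1), setReg l) := by
  induction l with
  | nil => rfl
  | cons fr r ih =>
    cases fr with
    | none =>
      simp only [segOK] at h
      have := ih h
      simp only [collectNewly, this, bFacts_none_cons, setReg, List.map_cons, Option.map_none]
    | some p =>
      obtain ⟨f, c, rg⟩ := p
      cases rg with
      | true =>
        simp only [segOK, if_true] at h
        have hfilt : (bFacts r).filter (fun q => decide (q.2.2 = false)) = [] := by
          rw [List.filter_eq_nil_iff]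
          intro q hq
          simp [allReg_mem r h q hq]
        have hset : setReg r = r := allReg_setReg_id r h
        simp only [collectNewly, bFacts_some_cons, List.filter_cons]
        simp only [setReg, List.map_cons, Option.map_some] at hset ⊢
        simp [hfilt, hset]
        intro a a1 hmem
        have := allReg_mem r h _ hmem
        simp at this
      | false =>
        simp only [segOK] at h
        rw [if_neg (by simp)] at h
        rw [Bool.and_eq_true] at h
        have := ih h.2
        simp only [collectNewly, this, bFacts_some_cons, List.filter_cons, setReg,
          List.map_cons, Option.map_some]
        simp

theorem lookup_unreg (l : List BFrame) (f : Int) :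
    segOK l = true → (∃ b, (f, b, false) ∈ bFacts l) →
    ∀ p, (openEnts l p).lookup f = some (p, false) := by
  induction l with
  | nil => intro _ hm; obtain ⟨b, hb⟩ := hm; simp [bFacts] at hb
  | cons fr r ih =>
    intro h hm p
    obtain ⟨b, hb⟩ := hm
    cases fr with
    | none =>
      simp only [segOK] at h
      rw [bFacts_none_cons] at hb
      exact ih h ⟨b, hb⟩ p
    | some q =>
      obtain ⟨g, c, rg⟩ := q
      cases rg with
      | true =>
        exfalso
        simp only [segOK, if_true] at h
        rw [bFacts_some_cons] at hb
        rcases List.mem_cons.mp hb with h1 | h1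
        · have h3 : false = true := congrArg (fun q => q.2.2) h1
          exact Bool.false_ne_true h3
        · have := allReg_mem r h _ h1
          simp at this
      | false =>
        simp only [segOK] at h
        rw [if_neg (by simp)] at h
        rw [Bool.and_eq_true, List.isEmpty_iff] at h
        obtain ⟨hc, hr⟩ := h
        subst hc
        by_cases hfg : f = g
        · subst hfg
          simp [openEnts, List.lookup]
        · rw [bFacts_some_cons] at hb
          rcases List.mem_cons.mp hb with h1 | h1
          · exact absurd (congrArg (fun q => q.1) h1) hfg
          · have hb2 : (f == g) = false := beq_eq_false_iff_ne.mpr hfg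
            simp only [openEnts, List.nil_append, List.lookup, hb2]
            exact ih hr ⟨b, h1⟩ p

theorem rootScan_spec (l : List BFrame) : rootScan l = ((bFacts l).map (·.1)).head? := by
  induction l with
  | nil => rfl
  | cons fr r ih =>
    cases fr with
    | none => simpa [rootScan, bFacts_none_cons] using ih
    | some q => obtain ⟨f, b, rg⟩ := q; simp [rootScan, bFacts_some_cons]


-- ---- characterization of A's inner token loop over the fact stack ----
def tokStep (item : String) (d : PySem.Dict Int (List String)) (j : Int) : PySem.Dict Int (List String) :=
  (if d.contains j then d else d.insert j []).modify j [] (fun l => l ++ [item])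

theorem contains_tokStep (item : String) (d : PySem.Dict Int (List String)) (j k : Int) :
    (tokStep item d j).contains k = (k == j || d.contains k) := by
  unfold tokStep PySem.Dict.modify
  by_cases hc : d.contains j
  · simp [hc, PySem.Dict.contains_insert]
  · simp [hc, PySem.Dict.contains_insert]

theorem nodup_keys_tokStep (item : String) (d : PySem.Dict Int (List String)) (j : Int)
    (h : d.keys.Nodup) : (tokStep item d j).keys.Nodup := by
  unfold tokStep PySem.Dict.modify
  by_cases hc : d.contains j
  · simp only [hc, if_true]
    exact PySem.Dict.nodup_keys_insert _ _ _ h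
  · simp only [hc, if_false]
    exact PySem.Dict.nodup_keys_insert _ _ _ (PySem.Dict.nodup_keys_insert _ _ _ h)

theorem tokStep_items_contains (item : String) (d : PySem.Dict Int (List String)) (j : Int)
    (hnd : d.keys.Nodup) (hc : d.contains j = true) :
    (tokStep item d j).items = d.items.map (fun p => if p.1 == j then (p.1, p.2 ++ [item]) else p) := by
  unfold tokStep PySem.Dict.modify
  simp only [hc, if_true]
  rw [PySem.Dict.items_insert_of_contains _ _ hc]
  apply List.map_congr_left
  intro p hp
  by_cases hpj : p.1 = j
  · have hbeq : (p.1 == j) = true := beq_iff_eq.mpr hpj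
    simp only [hbeq, if_true]
    have hmem : (j, p.2) ∈ d.items := by rw [← hpj]; exact hp
    have := PySem.Dict.getD_of_mem_items (h := hmem) (hnd := hnd) (d0 := [])
    rw [this, hpj]
  · have hbeq : (p.1 == j) = false := beq_eq_false_iff_ne.mpr hpj
    simp [hbeq]

theorem tokStep_items_not_contains (item : String) (d : PySem.Dict Int (List String)) (j : Int)
    (hc : d.contains j = false) :
    (tokStep item d j).items = d.items ++ [(j, [item])] := by
  unfold tokStep PySem.Dict.modify
  simp only [hc, if_false, Bool.false_eq_true]
  have hc1 : (d.insert j []).contains j = true := PySem.Dict.contains_insert_self d j []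
  have hg : (d.insert j []).getD j [] = [] := by
    rw [PySem.Dict.getD_eq_get?_getD, PySem.Dict.get?_insert_self]
    rfl
  rw [hg]
  rw [PySem.Dict.items_insert_of_contains _ _ hc1]
  rw [PySem.Dict.items_insert_of_not_contains _ _ hc]
  rw [List.map_append]
  congr 1
  · have hptw : ∀ p ∈ d.items,
        (if (p.1 == j) = true then (j, ([] : List String) ++ [item]) else p) = id p := by
      intro p hp
      have : (p.1 == j) = false := by
        unfold PySem.Dict.contains at hc
        rw [List.any_eq_false] at hc
        simpa using hc p hp
      simp [this]
    rw [List.map_congr_left hptw, List.map_id]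
  · simp

theorem foldA_items (item : String) :
    ∀ (fs : List Int) (d : PySem.Dict Int (List String)), d.keys.Nodup → fs.Nodup →
    (fs.foldl (tokStep item) d).items
      = d.items.map (fun p => if p.1 ∈ fs then (p.1, p.2 ++ [item]) else p)
        ++ (fs.filter (fun j => ¬ d.contains j)).map (fun j => (j, [item])) := by
  intro fs
  induction fs with
  | nil =>
    intro d hnd _
    simp
  | cons j rest ih =>
    intro d hnd hfs
    rw [List.nodup_cons] at hfs
    obtain ⟨hjr, hrest⟩ := hfs
    rw [List.foldl_cons]
    rw [ih (tokStep item d j) (nodup_keys_tokStep item d j hnd) hrest]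
    by_cases hc : d.contains j = true
    · rw [tokStep_items_contains item d j hnd hc]
      rw [List.map_map]
      congr 1
      · apply List.map_congr_left
        intro p _
        by_cases hpj : p.1 = j
        · have hbeq : (p.1 == j) = true := beq_iff_eq.mpr hpj
          simp [Function.comp_def, hbeq, hpj, hjr]
        · have hbeq : (p.1 == j) = false := beq_eq_false_iff_ne.mpr hpj
          by_cases hpr : p.1 ∈ rest <;> simp [Function.comp_def, hbeq, hpj, hpr]
      · congr 1
        rw [List.filter_cons]
        simp only [hc, decide_not]
        simp only [decide_true, Bool.not_true, Bool.false_eq_true, if_false]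
        apply List.filter_congr
        intro k hk
        have hkj : k ≠ j := fun hkk => hjr (hkk ▸ hk)
        rw [contains_tokStep]
        simp [beq_eq_false_iff_ne.mpr hkj]
    · rw [Bool.not_eq_true] at hc
      rw [tokStep_items_not_contains item d j hc]
      rw [List.map_append]
      have hfilt : rest.filter (fun k => ¬ (tokStep item d j).contains k)
          = rest.filter (fun k => ¬ d.contains k) := by
        apply List.filter_congr
        intro k hk
        have hkj : k ≠ j := fun hkk => hjr (hkk ▸ hk)
        rw [contains_tokStep]
        simp [beq_eq_false_iff_ne.mpr hkj]
      rw [hfilt]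
      simp only [List.filter_cons]
      simp only [hc]
      simp only [List.append_assoc]
      congr 1
      · apply List.map_congr_left
        intro p hp
        have hpj : p.1 ≠ j := by
          intro hpp
          have : d.contains p.1 = true := by
            unfold PySem.Dict.contains
            rw [List.any_eq_true]
            exact ⟨p, hp, by simp⟩
          rw [hpp] at this
          rw [this] at hc
          exact Bool.true_eq_false ▸ (by simp at hc)
        by_cases hpr : p.1 ∈ rest <;> simp [hpj, hpr]
      · simp [hjr]


-- ---- small corollaries ----
theorem ids_mergeUp (l : List BFrame) (b : List String) :
    (bFacts (mergeUp l b)).map (·.1) = (bFacts l).map (·.1) := by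
  have h := bFacts_mergeUp_shape l b
  have := congrArg (List.map (fun q : Int × Bool => q.1)) h
  simpa [List.map_map, Function.comp_def] using this

theorem ids_setReg (l : List BFrame) :
    (bFacts (setReg l)).map (·.1) = (bFacts l).map (·.1) := by
  rw [bFacts_setReg]
  simp [List.map_map, Function.comp_def]

theorem allReg_mergeUp (l : List BFrame) (b : List String) :
    allReg (mergeUp l b) = allReg l := by
  induction l with
  | nil => rfl
  | cons fr r ih =>
    cases fr with
    | none => simpa [mergeUp, allReg] using ih
    | some q => obtain ⟨f, c, rg⟩ := q; simp [mergeUp, allReg]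

theorem mergeUp_nil (l : List BFrame) : mergeUp l [] = l := by
  induction l with
  | nil => rfl
  | cons fr r ih =>
    cases fr with
    | none => simp [mergeUp, ih]
    | some q => obtain ⟨f, c, rg⟩ := q; simp [mergeUp]

theorem mem_shape_mergeUp (l : List BFrame) (b : List String) (p : Int × List String × Bool)
    (hp : p ∈ bFacts (mergeUp l b)) : ∃ q ∈ bFacts l, q.1 = p.1 ∧ q.2.2 = p.2.2 := by
  have h := bFacts_mergeUp_shape l b
  have hm : (p.1, p.2.2) ∈ (bFacts l).map (fun q => (q.1, q.2.2)) := by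
    rw [← h]
    exact List.mem_map.mpr ⟨p, hp, rfl⟩
  obtain ⟨q, hq, hqe⟩ := List.mem_map.mp hm
  exact ⟨q, hq, (Prod.ext_iff.mp hqe).1, (Prod.ext_iff.mp hqe).2⟩

theorem lookup_isSome_of_mem {α : Type} (l : List (Int × α)) (f : Int)
    (h : f ∈ l.map (·.1)) : (l.lookup f).isSome := by
  induction l with
  | nil => simp at h
  | cons p r ih =>
    by_cases hf : f = p.1
    · simp [List.lookup, beq_iff_eq.mpr hf]
    · have hb : (f == p.1) = false := beq_eq_false_iff_ne.mpr hf
      rw [List.map_cons, List.mem_cons] at h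
      rcases h with h | h
      · exact absurd h hf
      · simp only [List.lookup, hb]
        exact ih h

theorem mem_openEnts (l : List BFrame) :
    ∀ (p : List String) (q : Int × List String × Bool), q ∈ openEnts l p →
      ∃ b', (q.1, b', q.2.2) ∈ bFacts l := by
  induction l with
  | nil => intro p q hq; simp [openEnts] at hq
  | cons fr r ih =>
    intro p q hq
    cases fr with
    | none =>
      obtain ⟨b', hb'⟩ := ih p q hq
      exact ⟨b', by rwa [bFacts_none_cons]⟩
    | some w =>
      obtain ⟨g, c, rg⟩ := w
      simp only [openEnts] at hq
      rcases List.mem_cons.mp hq with h1 | h1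
      · subst h1
        exact ⟨c, by rw [bFacts_some_cons]; exact List.mem_cons_self⟩
      · obtain ⟨b', hb'⟩ := ih _ q h1
        exact ⟨b', by rw [bFacts_some_cons]; exact List.mem_cons.mpr (Or.inr hb')⟩

theorem keys_mk_valMap (sb : StB) : (PySem.Dict.mk (valMap sb)).keys = sb.order := by
  show (valMap sb).map (·.1) = sb.order
  simp [valMap, List.map_map, Function.comp_def]

theorem step_fact (item : String) (sa : StA) (sb : StB) (h : RInv sa sb)
    (hop : PySem.Str.pyGet? item 0 = some '(') (hF : PySem.Str.pyGet? item 1 = some 'F') :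
    RInv (stepA sa item) (stepB sb item) := by
  obtain ⟨h1, h2, h3, h4, h5, h6, h7, h8, h9, h10, h11, h12, h13, h14, h15⟩ := h
  have hop' := hop; have hF' := hF
  simp only [PySem.Str.pyGet?, PySem.Chars.pyGet?] at hop' hF'
  have ha : stepA sa item = ⟨sa.fact_stack ++ [sa.fact_id], sa.type_stack ++ ["fact"],
      sa.fact_id_map.insert sa.fact_id ((PySem.List.pyGet? (sa.fact_stack ++ [sa.fact_id]) 0).getD 0),
      sa.fact_terms, sa.fact_id + 1⟩ := by
    simp [stepA, label_classify, hop', hF']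
  have hb : stepB sb item = ⟨some (sb.fact_id, [], false) :: sb.frames, sb.order, sb.done,
      sb.fact_id_map.insert sb.fact_id ((rootScan sb.frames.reverse).getD sb.fact_id),
      sb.fact_id + 1⟩ := by
    simp [stepB, hop', hF']
  rw [ha, hb]
  have hroot : ((PySem.List.pyGet? (sa.fact_stack ++ [sa.fact_id]) 0).getD 0)
      = ((rootScan sb.frames.reverse).getD sa.fact_id) := by
    rw [rootScan_spec]
    have hbr : bFacts sb.frames.reverse = (bFacts sb.frames).reverse := by
      simp [bFacts]
    rw [hbr, List.map_reverse, ← h4]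
    cases sa.fact_stack with
    | nil => simp [PySem.List.pyGet?_zero_cons]
    | cons x xs => rw [List.cons_append, PySem.List.pyGet?_zero_cons]; simp
  have hids : (bFacts (some (sb.fact_id, [], false) :: sb.frames)).map (·.1)
      = sb.fact_id :: (bFacts sb.frames).map (·.1) := by
    rw [bFacts_some_cons, List.map_cons]
  have hfid_not_order : sb.fact_id ∉ sb.order := fun hmem => absurd (h15 _ hmem) (lt_irrefl _)
  have hfid_not_ids : sb.fact_id ∉ (bFacts sb.frames).map (·.1) :=
    fun hmem => absurd (h14 _ hmem) (lt_irrefl _)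
  refine ⟨by rw [h1], ?_, ?_, ?_, ?_, ?_, ?_, ?_, h9, h10, ?_, h12, ?_, ?_, ?_⟩
  · rw [h1] at hroot ⊢
    rw [h2, hroot]
  · rw [h3]
    simp [frameType]
  · rw [h4, h1, hids]
    simp
  · rw [h5]
    apply congrArg
    apply List.map_congr_left
    intro f hf
    have hne : (f == sb.fact_id) = false :=
      beq_eq_false_iff_ne.mpr (fun he => absurd (he ▸ h15 f hf) (lt_irrefl _))
    simp only [valOf, openEnts, List.nil_append, List.append_nil, List.lookup, hne]
  · intro p hp
    rw [bFacts_some_cons] at hp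
    rcases List.mem_cons.mp hp with h' | h'
    · subst h'
      simp only []
      constructor
      · intro hfalse; exact absurd hfalse (by simp)
      · intro hmem; exact absurd hmem hfid_not_order
    · exact h6 p h'
  · simp [segOK, h7]
  · rw [hids]
    exact List.nodup_cons.mpr ⟨hfid_not_ids, h8⟩
  · intro f hf
    rw [hids]
    intro hmem
    rcases List.mem_cons.mp hmem with h' | h'
    · exact absurd (h' ▸ h15 f (h12 f hf)) (lt_irrefl _)
    · exact h11 f hf h'
  · intro f hf
    rcases h13 f hf with h' | h'
    · exact Or.inl h'
    · exact Or.inr (by rw [hids]; exact List.mem_cons.mpr (Or.inr h'))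
  · intro f hf
    rw [hids] at hf
    dsimp only
    rcases List.mem_cons.mp hf with h' | h'
    · subst h'; omega
    · have := h14 f h'; omega
  · intro f hf
    dsimp only
    have := h15 f hf; omega

theorem step_phrase (item : String) (sa : StA) (sb : StB) (h : RInv sa sb)
    (hop : PySem.Str.pyGet? item 0 = some '(') (hF : ¬ PySem.Str.pyGet? item 1 = some 'F') :
    RInv (stepA sa item) (stepB sb item) := by
  obtain ⟨h1, h2, h3, h4, h5, h6, h7, h8, h9, h10, h11, h12, h13, h14, h15⟩ := h
  have hop' := hop; have hF' := hF
  simp only [PySem.Str.pyGet?, PySem.Chars.pyGet?] at hop' hF'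
  have ha : stepA sa item = { sa with type_stack := sa.type_stack ++ ["phrase"] } := by
    simp [stepA, label_classify, hop', hF']
  have hb : stepB sb item = { sb with frames := none :: sb.frames } := by
    simp [stepB, hop', hF']
  rw [ha, hb]
  refine ⟨h1, h2, ?_, ?_, ?_, ?_, ?_, ?_, h9, h10, ?_, h12, ?_, ?_, h15⟩
  · rw [h3]; simp [frameType]
  · rw [h4, bFacts_none_cons]
  · rw [h5]
    apply congrArg
    apply List.map_congr_left
    intro f _
    simp only [valOf, openEnts]
  · intro p hp
    rw [bFacts_none_cons] at hp
    exact h6 p hp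
  · simpa [segOK] using h7
  · rw [bFacts_none_cons]; exact h8
  · intro f hf; rw [bFacts_none_cons]; exact h11 f hf
  · intro f hf; rw [bFacts_none_cons]; exact h13 f hf
  · intro f hf; rw [bFacts_none_cons] at hf; exact h14 f hf

theorem step_end (item : String) (sa : StA) (sb : StB) (h : RInv sa sb)
    (hop : ¬ PySem.Str.pyGet? item 0 = some '(') (hcl : PySem.Str.pyGet? item 0 = some ')') :
    RInv (stepA sa item) (stepB sb item) := by
  obtain ⟨h1, h2, h3, h4, h5, h6, h7, h8, h9, h10, h11, h12, h13, h14, h15⟩ := h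
  have hop' := hop; have hcl' := hcl
  simp only [PySem.Str.pyGet?, PySem.Chars.pyGet?] at hop' hcl'
  cases hfr : sb.frames with
  | nil =>
    have hts : sa.type_stack = [] := by rw [h3, hfr]; rfl
    have ha : stepA sa item = sa := by
      simp [stepA, label_classify, hop', hcl', hts]
    have hb : stepB sb item = sb := by
      simp [stepB, hop', hcl', closeTop, hfr]
    rw [ha, hb]
    exact ⟨h1, h2, h3, h4, h5, h6, h7, h8, h9, h10, h11, h12, h13, h14, h15⟩
  | cons fr rest =>
    cases fr with
    | none =>
      have hts : sa.type_stack = (rest.map frameType).reverse ++ ["phrase"] := by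
        rw [h3, hfr]; simp [frameType]
      have ha : stepA sa item = { sa with type_stack := sa.type_stack.dropLast } := by
        simp [stepA, label_classify, hop', hcl', hts]
      have hb : stepB sb item = { sb with frames := rest } := by
        simp [stepB, hop', hcl', closeTop, hfr]
      rw [ha, hb]
      have hbf : bFacts sb.frames = bFacts rest := by rw [hfr, bFacts_none_cons]
      refine ⟨h1, h2, ?_, ?_, ?_, ?_, ?_, ?_, h9, h10, ?_, h12, ?_, ?_, h15⟩
      · rw [hts]; simp [List.dropLast_concat]
      · rw [h4, hbf]
      · rw [h5]
        apply congrArg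
        apply List.map_congr_left
        intro g _
        simp only [valOf, hfr, openEnts]
      · intro p hp; exact h6 p (by rwa [hbf])
      · have := h7; rw [hfr] at this; simpa [segOK] using this
      · rw [← hbf]; exact h8
      · intro f hf; rw [← hbf]; exact h11 f hf
      · intro f hf; rw [← hbf]; exact h13 f hf
      · intro f hf; rw [← hbf] at hf; exact h14 f hf
    | some q =>
      obtain ⟨f0, b0, rg⟩ := q
      have hts : sa.type_stack = (rest.map frameType).reverse ++ ["fact"] := by
        rw [h3, hfr]; simp [frameType]
      have hfs : sa.fact_stack = ((bFacts rest).map (·.1)).reverse ++ [f0] := by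
        rw [h4, hfr, bFacts_some_cons]; simp
      have ha : stepA sa item = { sa with type_stack := sa.type_stack.dropLast, fact_stack := sa.fact_stack.dropLast } := by
        simp [stepA, label_classify, hop', hcl', hts]
      have hb : stepB sb item = { sb with frames := mergeUp rest b0, done := if rg then sb.done.insert f0 b0 else sb.done } := by
        simp [stepB, hop', hcl', closeTop, hfr]
      rw [ha, hb]
      have hseg := h7; rw [hfr] at hseg
      have hnodup := h8; rw [hfr, bFacts_some_cons, List.map_cons, List.nodup_cons] at hnodup
      obtain ⟨hf0notin, hnodup_rest⟩ := hnodup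
      have hhead_mem : (f0, b0, rg) ∈ bFacts sb.frames := by
        rw [hfr, bFacts_some_cons]; exact List.mem_cons_self
      have hiff := h6 _ hhead_mem
      have hids_new : (bFacts (mergeUp rest b0)).map (·.1) = (bFacts rest).map (·.1) :=
        ids_mergeUp rest b0
      refine ⟨h1, h2, ?_, ?_, ?_, ?_, ?_, ?_, h9, ?_, ?_, ?_, ?_, ?_, h15⟩
      · rw [hts]
        simp [List.dropLast_concat, frameType_mergeUp]
      · rw [hfs]
        simp [List.dropLast_concat, hids_new]
      · rw [h5]
        apply congrArg
        apply List.map_congr_left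
        intro g hg
        have hents : openEnts sb.frames [] = (f0, b0, rg) :: openEnts rest b0 := by
          rw [hfr]; simp [openEnts]
        have hents' : openEnts (mergeUp rest b0) [] = openEnts rest b0 := by
          rw [openEnts_mergeUp]; simp
        by_cases hgf : g = f0
        · subst hgf
          have hrg : rg = true := hiff.mpr hg
          subst hrg
          have hl1 : (openEnts sb.frames []).lookup g = some (b0, true) := by
            rw [hents]; simp [List.lookup]
          have hl2 : (openEnts (mergeUp rest b0) []).lookup g = none := by
            rw [hents']
            apply lookup_none
            rw [keys_openEnts]
            exact hf0notin
          simp only [valOf, hl1, hl2, if_true]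
          rw [PySem.Dict.getD_eq_get?_getD, PySem.Dict.get?_insert_self]
          rfl
        · have hbeq : (g == f0) = false := beq_eq_false_iff_ne.mpr hgf
          have hl1 : (openEnts sb.frames []).lookup g = (openEnts rest b0).lookup g := by
            rw [hents]; simp [List.lookup, hbeq]
          simp only [valOf, hl1, hents']
          cases hres : (openEnts rest b0).lookup g with
          | some p => rfl
          | none =>
            cases rg with
            | true =>
              simp only [if_true]
              rw [PySem.Dict.getD_insert_of_ne _ _ _ hgf]
            | false => rfl
      · intro p hp
        obtain ⟨q, hq, hq1, hq2⟩ := mem_shape_mergeUp rest b0 p hp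
        rw [← hq1, ← hq2]
        exact h6 q (by rw [hfr, bFacts_some_cons]; exact List.mem_cons.mpr (Or.inr hq))
      · cases rg with
        | true =>
          simp only [segOK, if_true] at hseg
          exact segOK_of_allReg _ (by rw [allReg_mergeUp]; exact hseg)
        | false =>
          simp only [segOK] at hseg
          rw [if_neg (by simp)] at hseg
          rw [Bool.and_eq_true, List.isEmpty_iff] at hseg
          rw [hseg.1, mergeUp_nil]
          exact hseg.2
      · rw [hids_new]; exact hnodup_rest
      · cases rg with
        | true => exact PySem.Dict.nodup_keys_insert _ _ _ h10
        | false => exact h10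
      · intro f hf
        rw [hids_new]
        cases rg with
        | true =>
          simp only [if_true] at hf
          rcases (PySem.Dict.mem_keys_insert _ _ _ _).mp hf with h' | h'
          · subst h'; exact hf0notin
          · have := h11 f h'
            rw [hfr, bFacts_some_cons, List.map_cons] at this
            intro hmem; exact this (List.mem_cons.mpr (Or.inr hmem))
        | false =>
          simp only [if_neg] at hf
          have := h11 f hf
          rw [hfr, bFacts_some_cons, List.map_cons] at this
          intro hmem; exact this (List.mem_cons.mpr (Or.inr hmem))
      · intro f hf
        cases rg with
        | true =>
          simp only [if_true] at hf
          rcases (PySem.Dict.mem_keys_insert _ _ _ _).mp hf with h' | h'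
          · subst h'; exact hiff.mp rfl
          · exact h12 f h'
        | false => exact h12 f hf
      · intro f hf
        rw [hids_new]
        rcases h13 f hf with h' | h'
        · cases rg with
          | true => exact Or.inl (by simp only [if_true]; exact (PySem.Dict.mem_keys_insert _ _ _ _).mpr (Or.inr h'))
          | false => exact Or.inl h'
        · rw [hfr, bFacts_some_cons, List.map_cons] at h'
          rcases List.mem_cons.mp h' with h'' | h''
          · subst h''
            have hrg : rg = true := hiff.mpr hf
            subst hrg
            exact Or.inl (by simp only [if_true]; exact (PySem.Dict.mem_keys_insert _ _ _ _).mpr (Or.inl rfl))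
          · exact Or.inr h''
      · intro f hf
        rw [hids_new] at hf
        apply h14
        rw [hfr, bFacts_some_cons, List.map_cons]
        exact List.mem_cons.mpr (Or.inr hf)

theorem step_tok (item : String) (sa : StA) (sb : StB) (h : RInv sa sb)
    (hop : ¬ PySem.Str.pyGet? item 0 = some '(') (hcl : ¬ PySem.Str.pyGet? item 0 = some ')')
    (hrf : ¬ PySem.Str.pyGet? item 0 = some '*') :
    RInv (stepA sa item) (stepB sb item) := by
  obtain ⟨h1, h2, h3, h4, h5, h6, h7, h8, h9, h10, h11, h12, h13, h14, h15⟩ := h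
  have hop' := hop; have hcl' := hcl; have hrf' := hrf
  simp only [PySem.Str.pyGet?, PySem.Chars.pyGet?] at hop' hcl' hrf'
  have ha : stepA sa item = { sa with fact_terms := sa.fact_stack.foldl (tokStep item) sa.fact_terms } := by
    simp [stepA, label_classify, hop', hcl', hrf', tokStep]
    rfl
  have hcol := collect_spec sb.frames h7
  have hb : stepB sb item = { sb with order := sb.order ++ (((bFacts sb.frames).filter (fun q => q.2.2 = false)).map (·.1)).reverse, frames := mergeUp (setReg sb.frames) [item] } := by
    simp [stepB, hop', hcl', hrf', hcol]
  rw [ha, hb]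
  have hNsub : ∀ f ∈ ((bFacts sb.frames).filter (fun q => q.2.2 = false)).map (·.1),
      f ∈ (bFacts sb.frames).map (·.1) := by
    intro f hf
    obtain ⟨q, hq, hq1⟩ := List.mem_map.mp hf
    exact List.mem_map.mpr ⟨q, (List.mem_filter.mp hq).1, hq1⟩
  have hNunreg : ∀ f ∈ ((bFacts sb.frames).filter (fun q => q.2.2 = false)).map (·.1),
      ∃ b', (f, b', false) ∈ bFacts sb.frames := by
    intro f hf
    obtain ⟨q, hq, hq1⟩ := List.mem_map.mp hf
    obtain ⟨hmem, hflag⟩ := List.mem_filter.mp hq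
    refine ⟨q.2.1, ?_⟩
    have hq2 : q.2.2 = false := by simpa using hflag
    have : (q.1, q.2.1, q.2.2) = q := rfl
    rw [← hq1, ← hq2, this]
    exact hmem
  have hNnotord : ∀ f ∈ ((bFacts sb.frames).filter (fun q => q.2.2 = false)).map (·.1),
      f ∉ sb.order := by
    intro f hf hford
    obtain ⟨b', hb'⟩ := hNunreg f hf
    have := (h6 _ hb').mpr hford
    simp at this
  have hids' : (bFacts (mergeUp (setReg sb.frames) [item])).map (·.1)
      = (bFacts sb.frames).map (·.1) := by
    rw [ids_mergeUp, ids_setReg]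
  have hlookup' : ∀ g, (openEnts (mergeUp (setReg sb.frames) [item]) []).lookup g
      = ((openEnts sb.frames []).lookup g).map (fun p => (p.1 ++ [item], true)) := by
    intro g
    have hcums' : openEnts (mergeUp (setReg sb.frames) [item]) []
        = (openEnts sb.frames []).map (fun q => (q.1, q.2.1 ++ [item], true)) := by
      rw [openEnts_mergeUp]
      simp only [List.append_nil]
      rw [openEnts_setReg, openEnts_pending]
      simp [List.map_map, Function.comp_def]
    rw [hcums']
    exact lookup_map_val (openEnts sb.frames []) (fun p => (p.1 ++ [item], true)) g
  refine ⟨h1, h2, ?_, ?_, ?_, ?_, ?_, ?_, ?_, h10, ?_, ?_, ?_, ?_, ?_⟩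
  · rw [h3, frameType_mergeUp, frameType_setReg]
  · rw [h4, hids']
  · -- fact_terms
    have hknd : (PySem.Dict.mk (valMap sb)).keys.Nodup := by
      rw [keys_mk_valMap]; exact h9
    have hfs_nodup : sa.fact_stack.Nodup := by
      rw [h4]; exact List.nodup_reverse.mpr h8
    apply PySem.Dict.ext
    rw [h5]
    rw [foldA_items item sa.fact_stack _ hknd hfs_nodup]
    unfold valMap
    dsimp only
    rw [List.map_append, List.map_map]
    congr 1
    · -- updated old entries
      apply List.map_congr_left
      intro f hf
      simp only [Function.comp_def]
      cases hres : (openEnts sb.frames []).lookup f with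
      | some p =>
        have hfids : f ∈ (bFacts sb.frames).map (·.1) := by
          rw [← keys_openEnts sb.frames []]
          exact List.mem_map.mpr ⟨(f, p), lookup_mem _ _ _ hres, rfl⟩
        have hffs : f ∈ sa.fact_stack := by
          rw [h4]; exact List.mem_reverse.mpr hfids
        simp only [valOf, hres, hffs, if_pos, hlookup' f]
        simp [valOf, hres, hlookup' f]
      | none =>
        have hfids : f ∉ (bFacts sb.frames).map (·.1) := by
          intro hmem
          have := lookup_isSome_of_mem (openEnts sb.frames []) f
            (by rw [keys_openEnts]; exact hmem)
          rw [hres] at this; simp at this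
        have hffs : f ∉ sa.fact_stack := by
          rw [h4]; exact fun hc => hfids (List.mem_reverse.mp hc)
        simp only [valOf, hres, hffs, if_neg, hlookup' f]
        simp [valOf, hres, hlookup' f, hffs]
    · -- new entries
      have hcont : ∀ j, (PySem.Dict.mk (List.map (fun f => (f, valOf sb f)) sb.order)).contains j
          = decide (j ∈ sb.order) := by
        intro j
        rw [PySem.Dict.contains_eq_decide_mem_keys]
        have hk := keys_mk_valMap sb
        unfold valMap at hk
        rw [hk]
      have hfilt : sa.fact_stack.filter (fun j => ¬ (PySem.Dict.mk (List.map (fun f => (f, valOf sb f)) sb.order)).contains j)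
          = (((bFacts sb.frames).filter (fun q => q.2.2 = false)).map (·.1)).reverse := by
        rw [h4, List.filter_reverse]
        congr 1
        rw [List.filter_map]
        congr 1
        apply List.filter_congr
        intro q hq
        have hiff := h6 q hq
        simp only [Function.comp_def, hcont]
        cases hflag : q.2.2 with
        | true => simp [hiff.mp hflag]
        | false =>
          have : q.1 ∉ sb.order := fun hc => by rw [hiff.mpr hc] at hflag; exact Bool.true_eq_false ▸ (by simp at hflag)
          simp [this]
      rw [hfilt]
      apply List.map_congr_left
      intro f hf
      rw [List.mem_reverse] at hf
      obtain ⟨b', hb'⟩ := hNunreg f hf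
      have hlk : (openEnts sb.frames []).lookup f = some ([], false) :=
        lookup_unreg sb.frames f h7 ⟨b', hb'⟩ []
      simp only [valOf, hlookup' f, hlk]
      simp
  · -- registration iff
    intro p hp
    obtain ⟨q, hq, hq1, hq2⟩ := mem_shape_mergeUp (setReg sb.frames) [item] p hp
    rw [bFacts_setReg] at hq
    obtain ⟨q0, hq0, hq0e⟩ := List.mem_map.mp hq
    have hflag : p.2.2 = true := by rw [← hq2, ← hq0e]
    have hid : p.1 = q0.1 := by rw [← hq1, ← hq0e]
    rw [hflag, hid]
    have hmem : q0.1 ∈ sb.order ++ (((bFacts sb.frames).filter (fun q => q.2.2 = false)).map (·.1)).reverse := by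
      cases hf0 : q0.2.2 with
      | true => exact List.mem_append.mpr (Or.inl ((h6 q0 hq0).mp hf0))
      | false =>
        refine List.mem_append.mpr (Or.inr (List.mem_reverse.mpr ?_))
        exact List.mem_map.mpr ⟨q0, List.mem_filter.mpr ⟨hq0, by simp [hf0]⟩, rfl⟩
    exact iff_of_true rfl hmem
  · -- segOK
    apply segOK_of_allReg
    rw [allReg_mergeUp]
    exact allReg_setReg _
  · rw [hids']; exact h8
  · -- order nodup
    apply List.Nodup.append h9
    · apply List.nodup_reverse.mpr
      have hsub : (((bFacts sb.frames).filter (fun q => q.2.2 = false)).map (·.1)).Sublist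
          ((bFacts sb.frames).map (·.1)) :=
        List.Sublist.map (fun x : Int × List String × Bool => x.1) List.filter_sublist
      exact h8.sublist hsub
    · intro f hford hfN
      exact hNnotord f (List.mem_reverse.mp hfN) hford
  · intro f hf; rw [hids']; exact h11 f hf
  · intro f hf; exact List.mem_append.mpr (Or.inl (h12 f hf))
  · intro f hf
    rw [hids']
    rcases List.mem_append.mp hf with h' | h'
    · exact h13 f h'
    · exact Or.inr (hNsub f (List.mem_reverse.mp h'))
  · intro f hf; rw [hids'] at hf; exact h14 f hf
  · intro f hf
    rcases List.mem_append.mp hf with h' | h'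
    · exact h15 f h'
    · exact h14 f (hNsub f (List.mem_reverse.mp h'))

theorem step_pres (item : String) (sa : StA) (sb : StB) (h : RInv sa sb) :
    RInv (stepA sa item) (stepB sb item) := by
  by_cases hop : PySem.Str.pyGet? item 0 = some '('
  · by_cases hF : PySem.Str.pyGet? item 1 = some 'F'
    · exact step_fact item sa sb h hop hF
    · exact step_phrase item sa sb h hop hF
  · by_cases hcl : PySem.Str.pyGet? item 0 = some ')'
    · exact step_end item sa sb h hop hcl
    · by_cases hrf : PySem.Str.pyGet? item 0 = some '*'
      · -- reference: both sides unchanged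
        have hop' := hop
        have hcl' := hcl
        have hrf' := hrf
        simp only [PySem.Str.pyGet?, PySem.Chars.pyGet?] at hop' hcl' hrf'
        have ha : stepA sa item = sa := by
          simp [stepA, label_classify, hop', hcl', hrf']
        have hb : stepB sb item = sb := by
          simp [stepB, hop', hcl', hrf']
        rw [ha, hb]; exact h
      · exact step_tok item sa sb h hop hcl hrf

theorem foldl_pres (l : List String) (sa : StA) (sb : StB) (h : RInv sa sb) :
    RInv (l.foldl stepA sa) (l.foldl stepB sb) := by
  induction l generalizing sa sb with
  | nil => exact h
  | cons x xs ih => exact ih _ _ (step_pres x sa sb h)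

theorem flush_get? (l : List BFrame) (done : PySem.Dict Int (List String)) :
    ((bFacts l).map (·.1)).Nodup →
    (∀ g ∈ done.keys, g ∉ (bFacts l).map (·.1)) →
    ∀ f, (flushFrames l done).get? f =
      (match (openEnts l []).lookup f with
        | some (v, true) => some v
        | some (_, false) => done.get? f
        | none => done.get? f) := by
  induction l, done using flushFrames.induct with
  | case1 done =>
    intro _ _ f
    simp [flushFrames, openEnts, List.lookup]
  | case2 rest done ih =>
    intro hnd hdisj f
    rw [flushFrames]
    exact ih (by rwa [bFacts_none_cons] at hnd)
      (by intro g hg; rw [← bFacts_none_cons (r := rest)]; exact hdisj g hg) f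
  | case3 g0 b0 rg rest done ih =>
    intro hnd hdisj f
    simp only [dite_eq_ite] at ih
    rw [bFacts_some_cons, List.map_cons, List.nodup_cons] at hnd
    obtain ⟨hg0notin, hnd_rest⟩ := hnd
    have hdisj' : ∀ g ∈ (if rg = true then done.insert g0 b0 else done).keys,
        g ∉ (bFacts (mergeUp rest b0)).map (·.1) := by
      intro g hg
      rw [ids_mergeUp]
      cases rg with
      | true =>
        simp only [if_true] at hg
        rcases (PySem.Dict.mem_keys_insert _ _ _ _).mp hg with h' | h'
        · subst h'; exact hg0notin
        · have := hdisj g h'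
          rw [bFacts_some_cons, List.map_cons] at this
          intro hmem; exact this (List.mem_cons.mpr (Or.inr hmem))
      | false =>
        simp only [if_neg] at hg
        have := hdisj g hg
        rw [bFacts_some_cons, List.map_cons] at this
        intro hmem; exact this (List.mem_cons.mpr (Or.inr hmem))
    have hnd' : ((bFacts (mergeUp rest b0)).map (·.1)).Nodup := by
      rw [ids_mergeUp]; exact hnd_rest
    rw [flushFrames]
    rw [ih hnd' hdisj' f]
    have hoe : openEnts (mergeUp rest b0) [] = openEnts rest b0 := by
      rw [openEnts_mergeUp]; simp
    have hoel : openEnts (some (g0, b0, rg) :: rest) [] = (g0, b0, rg) :: openEnts rest b0 := by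
      simp [openEnts]
    rw [hoe, hoel]
    by_cases hfg : f = g0
    · subst hfg
      have hl : (openEnts rest b0).lookup f = none := by
        apply lookup_none
        rw [keys_openEnts]
        exact hg0notin
      rw [hl]
      have hl2 : ((f, b0, rg) :: openEnts rest b0).lookup f = some (b0, rg) := by
        simp [List.lookup]
      rw [hl2]
      cases rg with
      | true => simp [PySem.Dict.get?_insert_self]
      | false => simp
    · have hbeq : (f == g0) = false := beq_eq_false_iff_ne.mpr hfg
      have hl2 : ((g0, b0, rg) :: openEnts rest b0).lookup f = (openEnts rest b0).lookup f := by
        simp [List.lookup, hbeq]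
      rw [hl2]
      cases hres : (openEnts rest b0).lookup f with
      | none =>
        cases rg with
        | true => simp [PySem.Dict.get?_insert_of_ne _ _ hfg]
        | false => simp
      | some p =>
        obtain ⟨v, flag⟩ := p
        cases flag with
        | true => simp
        | false =>
          cases rg with
          | true => simp [PySem.Dict.get?_insert_of_ne _ _ hfg]
          | false => simp

theorem final_out (sa : StA) (sb : StB) (h : RInv sa sb) :
    (sa.fact_terms.items, sa.fact_id_map.items) =
      ((sb.order.foldl (fun d f => d.insert f ((flushFrames sb.frames sb.done).getD f []))
        PySem.Dict.empty).items, sb.fact_id_map.items) := by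
  obtain ⟨h1, h2, h3, h4, h5, h6, h7, h8, h9, h10, h11, h12, h13, h14, h15⟩ := h
  refine Prod.ext ?_ (by rw [h2])
  rw [h5]
  have hfresh : ∀ a ∈ sb.order, (PySem.Dict.empty : PySem.Dict Int (List String)).contains a = false := by
    intro a _; exact PySem.Dict.contains_empty a
  have hnodup : (sb.order.map (fun f => f)).Nodup := by simpa using h9
  rw [PySem.Dict.items_foldl_insert_fresh sb.order (fun f => f)
    (fun f => (flushFrames sb.frames sb.done).getD f []) PySem.Dict.empty hfresh hnodup]
  show valMap sb = _ ++ _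
  have hempty : (PySem.Dict.empty : PySem.Dict Int (List String)).items = [] := rfl
  rw [hempty, List.nil_append]
  apply List.map_congr_left
  intro f hf
  have hflush := flush_get? sb.frames sb.done h8 h11 f
  rw [PySem.Dict.getD_eq_get?_getD, hflush]
  cases hres : (openEnts sb.frames []).lookup f with
  | none =>
    simp only [valOf, hres]
    rw [PySem.Dict.getD_eq_get?_getD]
  | some p =>
    obtain ⟨v, flag⟩ := p
    cases flag with
    | true => simp [valOf, hres]
    | false =>
      exfalso
      have hmem := lookup_mem _ _ _ hres
      obtain ⟨b', hb'⟩ := mem_openEnts sb.frames [] (f, v, false) hmem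
      have := (h6 _ hb').mpr hf
      simp at this

-- ===== VERDICT (by name: the statement is the Claim_ definition above) =====
theorem doc_fact_spec : Claim_equal_doc_fact := by
  intro line _ _
  unfold Spec_doc_fact doc_fact doc_fact_alt
  have h0 : RInv ⟨[], [], PySem.Dict.empty, PySem.Dict.empty, 0⟩
      ⟨[], [], PySem.Dict.empty, PySem.Dict.empty, 0⟩ := by
    refine ⟨rfl, rfl, rfl, rfl, ?_, ?_, rfl, ?_, ?_, ?_, ?_, ?_, ?_, ?_, ?_⟩ <;>
      simp [valMap, bFacts, PySem.Dict.empty, PySem.Dict.keys]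
  exact final_out _ _ (foldl_pres line _ _ h0)
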